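-- pv_equiv track=rewrite | github.com/RoniBlade/nq2 | PyCharmProjects/Founder Bussines Idea/sniffer/tap_reader.py | extract_json_arrays
-- ===== SOURCE A (Python) =====
-- from typing import Any, Dict, Iterable, List, Tuple, Union
--
-- def extract_json_arrays(blob: str) -> List[str]:
--     """
--     Достаём верхнеуровневые JSON-массивы из batchexecute-блоба.
--     Игнорируем префиксы-размеры (числа/счётчики). Парсер
--     «понимает» строки и не путается из-за скобок внутри кавычек.
--
--     Возвращает подстроки вида:
--         [[ "wrb.fr", "g4kJzf", "<payload string>", ... ], ["di",...], ...]
--     """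
--     arrays: List[str] = []
--     i, n = 0, len(blob)
--     while True:
--         start = blob.find('[[', i)
--         if start == -1:
--             break
--
--         depth = 0
--         in_str = False
--         esc = False
--         j = start
--         while j < n:
--             ch = blob[j]
--             if in_str:
--                 if esc:
--                     esc = False
--                 elif ch == '\\':
--                     esc = True
--                 elif ch == '"':
--                     in_str = False
--             else:
--                 if ch == '"':
--                     in_str = True
--                 elif ch == '[':
--                     depth += 1
--                 elif ch == ']':
--                     depth -= 1
--                     if depth == 0:
--                         arrays.append(blob[start:j+1])
--                         i = j + 1
--                         break
--             j += 1
--         else: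
--             # не нашли закрывающую скобку — выходим
--             break
--
--     return arrays
-- ===== SOURCE B (Python) =====
-- from typing import List
--
-- def extract_json_arrays(blob: str) -> List[str]:
--     """Single fused pass with an explicit in-array mode flag instead of find('[[') + inner scan."""
--     arrays: List[str] = []
--     n = len(blob)
--     in_array = False
--     start = 0
--     depth = 0
--     in_str = False
--     esc = False
--     j = 0
--     while j < n:
--         ch = blob[j]
--         if not in_array:
--             if ch == '[' and j + 1 < n and blob[j + 1] == '[':
--                 in_array = True
--                 start = j
--                 depth = 1
--                 in_str = False
--                 esc = False
--         else:
--             if in_str: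
--                 if esc:
--                     esc = False
--                 elif ch == '\\':
--                     esc = True
--                 elif ch == '"':
--                     in_str = False
--             else:
--                 if ch == '"':
--                     in_str = True
--                 elif ch == '[':
--                     depth += 1
--                 elif ch == ']':
--                     depth -= 1
--                     if depth == 0:
--                         arrays.append(blob[start:j + 1])
--                         in_array = False
--         j += 1
--     return arrays
-- ===== Notes on version B (the rewrite author's own statement) =====
-- stated objective: alternative
-- what changed: Replaced the nested find-then-rescan structure by one flat single pass over the characters with an explicit in-array mode flag: searching mode detects a double opening bracket; in-array mode runs the quote-aware depth counter and flips back to searching when the array closes.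
import Mathlib
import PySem

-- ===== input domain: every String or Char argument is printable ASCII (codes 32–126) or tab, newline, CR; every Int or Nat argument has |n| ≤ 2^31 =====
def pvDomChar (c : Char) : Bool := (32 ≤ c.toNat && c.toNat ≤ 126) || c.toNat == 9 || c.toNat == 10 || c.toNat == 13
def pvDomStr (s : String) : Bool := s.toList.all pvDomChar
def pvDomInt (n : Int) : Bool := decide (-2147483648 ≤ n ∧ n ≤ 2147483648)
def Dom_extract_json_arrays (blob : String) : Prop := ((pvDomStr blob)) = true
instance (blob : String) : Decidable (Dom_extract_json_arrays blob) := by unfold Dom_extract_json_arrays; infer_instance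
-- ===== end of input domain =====

-- B is an alternative decomposition (one fused pass with a mode flag instead of A's
-- nested substring-search + inner rescan of A); same O(n) cost, return values proved equal.

-- ===== PORT A =====

-- Python's blob.find of the two-char opener with start i: scan the suffix of cs starting at absolute index `base`,
-- return the absolute index of the first occurrence of the double opening bracket (none if absent).
def pvFind2 : List Char → Nat → Option Nat
  | [], _ => none
  | [_], _ => none
  | a :: b :: rest, base =>
      if a = '[' ∧ b = '[' then some base else pvFind2 (b :: rest) (base + 1)

-- A's inner while loop: quote-aware scan of the suffix starting at absolute index j
-- with state (depth, in_str, esc); returns the absolute index of the closing ']'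
-- that brings depth to 0, or none if the suffix ends first.
def pvScanA : List Char → Nat → Int → Bool → Bool → Option Nat
  | [], _, _, _, _ => none
  | ch :: rest, j, depth, in_str, esc =>
      if in_str then
        if esc then pvScanA rest (j + 1) depth in_str false
        else if ch = '\\' then pvScanA rest (j + 1) depth in_str true
        else if ch = '"' then pvScanA rest (j + 1) depth false esc
        else pvScanA rest (j + 1) depth in_str esc
      else
        if ch = '"' then pvScanA rest (j + 1) depth true esc
        else if ch = '[' then pvScanA rest (j + 1) (depth + 1) in_str esc
        else if ch = ']' then
          (if depth - 1 = 0 then some j else pvScanA rest (j + 1) (depth - 1) in_str esc)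
        else pvScanA rest (j + 1) depth in_str esc

theorem pvFind2_facts : ∀ (l : List Char) (base st : Nat), pvFind2 l base = some st →
    base ≤ st ∧ 2 ≤ l.length ∧ ∃ r, l.drop (st - base) = '[' :: '[' :: r := by
  intro l
  induction l with
  | nil => intro base st h; simp [pvFind2] at h
  | cons a t ih =>
    intro base st h
    cases t with
    | nil => simp [pvFind2] at h
    | cons b r =>
      by_cases hc : a = '[' ∧ b = '['
      · simp [pvFind2, hc] at h
        subst h
        exact ⟨le_refl _, by simp, r, by simp [hc.1, hc.2]⟩
      · simp [pvFind2, hc] at h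
        obtain ⟨h1, h2, rr, h3⟩ := ih (base + 1) st h
        refine ⟨by omega, by simp, rr, ?_⟩
        have : st - base = (st - (base + 1)) + 1 := by omega
        rw [this]
        simpa using h3

theorem pvScanA_ge : ∀ (l : List Char) (j : Nat) (d : Int) (s e : Bool) (j' : Nat),
    pvScanA l j d s e = some j' → j ≤ j' := by
  intro l
  induction l with
  | nil => intro j d s e j' h; simp [pvScanA] at h
  | cons ch rest ih =>
    intro j d s e j' h
    simp only [pvScanA] at h
    split_ifs at h with h1 h2 h3 h4 h5 h6 h7 h8 <;>
      first
        | (exact Nat.le_of_succ_le (ih _ _ _ _ _ h))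
        | (cases h; exact le_refl _)

-- A's outer `while True` loop: find the opener from i, scan from there; repeat past the
-- closing bracket or stop.
def pvLoopA (cs : List Char) (i : Nat) (acc : List String) : List String :=
  match hf : pvFind2 (cs.drop i) i with
  | none => acc
  | some st =>
      match hs : pvScanA (cs.drop st) st 0 false false with
      | none => acc
      | some j =>
          pvLoopA cs (j + 1) (acc ++ [String.ofList ((cs.drop st).take (j + 1 - st))])
termination_by cs.length - i
decreasing_by
  have h1 := pvFind2_facts _ _ _ hf
  have h2 := pvScanA_ge _ _ _ _ _ _ hs
  have h3 : (cs.drop i).length = cs.length - i := by simp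
  omega

def extract_json_arrays (blob : String) : List String :=
  pvLoopA blob.toList 0 []

-- ===== PORT B =====

-- B's single flat while loop (one pass): `l` is the suffix of cs at absolute index j;
-- inArr is the mode flag; (start, depth, in_str, esc) is the array-scanning state.
def pvLoopB (cs : List Char) : List Char → Nat → Bool → Nat → Int → Bool → Bool →
    List String → List String
  | [], _, _, _, _, _, _, acc => acc
  | [_], j, false, start, depth, in_str, esc, acc =>
      -- j + 1 < n fails: the lookahead guard is false, keep searching
      pvLoopB cs [] (j + 1) false start depth in_str esc acc
  | ch :: c2 :: rest2, j, false, start, depth, in_str, esc, acc =>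
      if ch = '[' ∧ c2 = '[' then
        pvLoopB cs (c2 :: rest2) (j + 1) true j 1 false false acc
      else
        pvLoopB cs (c2 :: rest2) (j + 1) false start depth in_str esc acc
  | ch :: rest, j, true, start, depth, in_str, esc, acc =>
      if in_str then
        if esc then pvLoopB cs rest (j + 1) true start depth in_str false acc
        else if ch = '\\' then pvLoopB cs rest (j + 1) true start depth in_str true acc
        else if ch = '"' then pvLoopB cs rest (j + 1) true start depth false esc acc
        else pvLoopB cs rest (j + 1) true start depth in_str esc acc
      else
        if ch = '"' then pvLoopB cs rest (j + 1) true start depth true esc acc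
        else if ch = '[' then pvLoopB cs rest (j + 1) true start (depth + 1) in_str esc acc
        else if ch = ']' then
          (if depth - 1 = 0 then
            pvLoopB cs rest (j + 1) false start (depth - 1) in_str esc
              (acc ++ [String.ofList ((cs.drop start).take (j + 1 - start))])
          else pvLoopB cs rest (j + 1) true start (depth - 1) in_str esc acc)
        else pvLoopB cs rest (j + 1) true start depth in_str esc acc

def extract_json_arrays_alt (blob : String) : List String :=
  pvLoopB blob.toList blob.toList 0 false 0 0 false false []

-- ===== PRECONDITION & SPEC =====
def Spec_extract_json_arrays (blob : String) (out : List String) : Prop := out = extract_json_arrays_alt blob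
instance (blob : String) (out : List String) : Decidable (Spec_extract_json_arrays blob out) := by unfold Spec_extract_json_arrays; infer_instance

-- ===== CLAIM (what is proved, stated in full; the proofs are below) =====
def Claim_equal_extract_json_arrays : Prop := ∀ (blob : String), Dom_extract_json_arrays blob → Spec_extract_json_arrays blob (extract_json_arrays blob)

-- ===== LEMMAS AND PROOFS =====

theorem drop_cons_succ {α : Type} (cs l : List α) (j : Nat) (a : α) (t : List α)
    (h : cs.drop j = l) (hl : l = a :: t) : cs.drop (j + 1) = t := by
  have : cs.drop (j + 1) = (cs.drop j).drop 1 := by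
    rw [List.drop_drop]
  rw [this, h, hl]
  simp

-- B in searching mode behaves like `pvFind2` followed by entering the array.
theorem pvLoopB_search (cs : List Char) : ∀ (l : List Char) (i : Nat)
    (st0 : Nat) (d0 : Int) (s0 e0 : Bool) (acc : List String), cs.drop i = l →
    pvLoopB cs l i false st0 d0 s0 e0 acc =
      (match pvFind2 l i with
       | none => acc
       | some st => pvLoopB cs (cs.drop (st + 1)) (st + 1) true st 1 false false acc) := by
  intro l
  induction l with
  | nil => intro i st0 d0 s0 e0 acc _; simp [pvLoopB, pvFind2]
  | cons a t ih =>
    intro i st0 d0 s0 e0 acc hdrop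
    cases t with
    | nil =>
      simp only [pvLoopB, pvFind2]
    | cons b r =>
      have h1 : cs.drop (i + 1) = b :: r := drop_cons_succ cs _ i a (b :: r) hdrop rfl
      by_cases hc : a = '[' ∧ b = '['
      · rw [pvLoopB, if_pos hc]
        simp only [pvFind2, if_pos hc]
        rw [h1]
      · rw [pvLoopB, if_neg hc]
        simp only [pvFind2, if_neg hc]
        exact ih (i + 1) st0 d0 s0 e0 acc h1

-- In searching mode the carried array state is irrelevant.
theorem pvLoopB_search_irrel (cs : List Char) (i : Nat)
    (st0 st1 : Nat) (d0 d1 : Int) (s0 s1 e0 e1 : Bool) (acc : List String) :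
    pvLoopB cs (cs.drop i) i false st0 d0 s0 e0 acc =
    pvLoopB cs (cs.drop i) i false st1 d1 s1 e1 acc := by
  rw [pvLoopB_search cs (cs.drop i) i st0 d0 s0 e0 acc rfl,
      pvLoopB_search cs (cs.drop i) i st1 d1 s1 e1 acc rfl]

-- B in in-array mode behaves like A's inner scan `pvScanA` followed by appending
-- the slice and returning to searching mode.
theorem pvLoopB_inarr (cs : List Char) : ∀ (l : List Char) (j : Nat) (start : Nat)
    (d : Int) (s e : Bool) (acc : List String), cs.drop j = l →
    pvLoopB cs l j true start d s e acc =
      (match pvScanA l j d s e with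
       | none => acc
       | some j' =>
           pvLoopB cs (cs.drop (j' + 1)) (j' + 1) false start 0 false false
             (acc ++ [String.ofList ((cs.drop start).take (j' + 1 - start))])) := by
  intro l
  induction l with
  | nil => intro j start d s e acc _; simp [pvLoopB, pvScanA]
  | cons ch rest ih =>
    intro j start d s e acc hdrop
    have h1 : cs.drop (j + 1) = rest := drop_cons_succ cs _ j ch rest hdrop rfl
    simp only [pvLoopB, pvScanA]
    split_ifs with hs he hbs hq hq2 hob hcb hz
    · exact ih (j + 1) start d s false acc h1
    · exact ih (j + 1) start d s true acc h1
    · exact ih (j + 1) start d false e acc h1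
    · exact ih (j + 1) start d s e acc h1
    · exact ih (j + 1) start d true e acc h1
    · exact ih (j + 1) start (d + 1) s e acc h1
    · -- closing bracket reaching depth 0
      rw [← h1]
      exact pvLoopB_search_irrel cs (j + 1) start start (d - 1) 0 s false e false _
    · exact ih (j + 1) start (d - 1) s e acc h1
    · exact ih (j + 1) start d s e acc h1

-- Main loop correspondence: A's outer loop equals B's flat loop in searching mode.
theorem pvLoop_main (cs : List Char) : ∀ (k i : Nat) (st0 : Nat) (d0 : Int)
    (s0 e0 : Bool) (acc : List String), cs.length - i ≤ k →
    pvLoopA cs i acc = pvLoopB cs (cs.drop i) i false st0 d0 s0 e0 acc := by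
  intro k
  induction k with
  | zero =>
    intro i st0 d0 s0 e0 acc hk
    have hnil : cs.drop i = [] := by
      apply List.drop_eq_nil_of_le; omega
    rw [pvLoopA, hnil]
    simp only [pvFind2]
    simp [pvLoopB]
  | succ k ih =>
    intro i st0 d0 s0 e0 acc hk
    rw [pvLoopA, pvLoopB_search cs (cs.drop i) i st0 d0 s0 e0 acc rfl]
    cases hf : pvFind2 (cs.drop i) i with
    | none => rfl
    | some st =>
      simp only
      obtain ⟨hle, hlen2, r, hdr⟩ := pvFind2_facts _ _ _ hf
      have hlen : (cs.drop i).length = cs.length - i := by simp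
      have hi : i < cs.length := by omega
      have hdropst : cs.drop st = '[' :: '[' :: r := by
        have : cs.drop st = (cs.drop i).drop (st - i) := by
          rw [List.drop_drop]; congr 1; omega
        rw [this, hdr]
      have hdropst1 : cs.drop (st + 1) = '[' :: r :=
        drop_cons_succ cs _ st '[' ('[' :: r) hdropst rfl
      -- one step of A's scan at the guaranteed '[' at index st
      have hstep : pvScanA (cs.drop st) st 0 false false =
          pvScanA ('[' :: r) (st + 1) 1 false false := by
        rw [hdropst]; simp [pvScanA]
      rw [pvLoopB_inarr cs (cs.drop (st + 1)) (st + 1) st 1 false false acc rfl, hdropst1]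
      rw [hstep]
      cases hsc : pvScanA ('[' :: r) (st + 1) 1 false false with
      | none => rfl
      | some j =>
        simp only
        have hj : st + 1 ≤ j := pvScanA_ge _ _ _ _ _ _ hsc
        exact ih (j + 1) st 0 false false _ (by omega)

-- ===== VERDICT (by name: the statement is the Claim_ definition above) =====
theorem extract_json_arrays_spec : Claim_equal_extract_json_arrays := by
  intro blob _
  unfold Spec_extract_json_arrays extract_json_arrays extract_json_arrays_alt
  exact pvLoop_main blob.toList blob.toList.length 0 0 0 false false [] (by omega)
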